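-- pv_equiv track=rewrite | github.com/Psy-Rat/MPEI_labs | RandomShorties/KarnaughMap2CNF.py | KarnoCoordinates
-- ===== SOURCE A (Python) =====
-- GrayCode = [[0, 0], [0, 1], [1, 1], [1, 0]]
--
-- def KarnoCoordinates(numb):
--     y = [(numb//2)%2, numb%2]
--     numb = (numb//2)//2
--     x = [(numb//2)%2, numb%2]
--     res = [x, y]
--     fin = []
--     for R in res:
--         for i in range(len(GrayCode)):
--             if (R[0]==GrayCode[i][0]) and (R[1]==GrayCode[i][1]):
--                 fin.append(i)
--                 break
--     return fin
-- ===== SOURCE B (Python) =====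
-- def KarnoCoordinates(numb):
--     b0 = numb % 2
--     a0 = (numb // 2) % 2
--     n = numb // 4
--     b1 = n % 2
--     a1 = (n // 2) % 2
--     return [2 * a1 + (a1 + b1) % 2, 2 * a0 + (a0 + b0) % 2]
-- ===== Notes on version B (the rewrite author's own statement) =====
-- stated objective: simpler
-- what changed: Replaces the GrayCode table scan (nested loop with break) by a direct closed-form Gray-to-binary decode of each extracted bit pair, dropping the table entirely.
import Mathlib
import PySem

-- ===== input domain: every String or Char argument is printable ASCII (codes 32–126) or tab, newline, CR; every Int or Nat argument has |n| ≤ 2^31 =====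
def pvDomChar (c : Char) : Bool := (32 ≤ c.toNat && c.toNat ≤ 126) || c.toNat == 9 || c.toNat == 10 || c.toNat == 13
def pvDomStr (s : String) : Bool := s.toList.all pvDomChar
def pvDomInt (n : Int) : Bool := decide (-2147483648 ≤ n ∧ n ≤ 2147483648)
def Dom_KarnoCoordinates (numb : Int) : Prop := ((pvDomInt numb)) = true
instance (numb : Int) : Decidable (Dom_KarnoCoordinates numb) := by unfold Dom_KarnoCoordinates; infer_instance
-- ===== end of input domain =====

-- B replaces A's GrayCode table scan by the closed-form Gray decode 2*a + (a+b)%2 (objective: simpler).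

-- ===== PORT A =====
def GrayCode : List (List Int) := [[0, 0], [0, 1], [1, 1], [1, 0]]

-- list indexing R[i] / GrayCode[i]; every index used by A is in range, so getD is never taken
def pvGetI (xs : List Int) (i : Int) : Int := (PySem.List.pyGet? xs i).getD 0
def pvGetL (xs : List (List Int)) (i : Int) : List Int := (PySem.List.pyGet? xs i).getD []

-- the inner 'for i in range(len(GrayCode)) … break' loop of A
def grayScan (R : List Int) : List Int → List Int
  | [] => []
  | i :: rest =>
    if pvGetI R 0 == pvGetI (pvGetL GrayCode i) 0 && pvGetI R 1 == pvGetI (pvGetL GrayCode i) 1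
    then [i] else grayScan R rest

def KarnoCoordinates (numb : Int) : List Int :=
  let y : List Int := [PySem.Int.mod (PySem.Int.floordiv numb 2) 2, PySem.Int.mod numb 2]
  let numb2 := PySem.Int.floordiv (PySem.Int.floordiv numb 2) 2
  let x : List Int := [PySem.Int.mod (PySem.Int.floordiv numb2 2) 2, PySem.Int.mod numb2 2]
  let res := [x, y]
  res.foldl (fun fin R => fin ++ grayScan R (PySem.List.pyRange 0 4 1)) []

-- ===== PORT B =====
def KarnoCoordinates_alt (numb : Int) : List Int :=
  let b0 := PySem.Int.mod numb 2
  let a0 := PySem.Int.mod (PySem.Int.floordiv numb 2) 2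
  let n := PySem.Int.floordiv numb 4
  let b1 := PySem.Int.mod n 2
  let a1 := PySem.Int.mod (PySem.Int.floordiv n 2) 2
  [2 * a1 + PySem.Int.mod (a1 + b1) 2, 2 * a0 + PySem.Int.mod (a0 + b0) 2]

-- ===== PRECONDITION & SPEC =====
def Spec_KarnoCoordinates (numb : Int) (out : List Int) : Prop := out = KarnoCoordinates_alt numb
instance (numb : Int) (out : List Int) : Decidable (Spec_KarnoCoordinates numb out) := by unfold Spec_KarnoCoordinates; infer_instance

-- ===== CLAIM (what is proved, stated in full; the proofs are below) =====
def Claim_equal_KarnoCoordinates : Prop := ∀ (numb : Int), Dom_KarnoCoordinates numb → Spec_KarnoCoordinates numb (KarnoCoordinates numb)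

-- ===== LEMMAS AND PROOFS =====

-- A's table scan on a 0/1 pair returns exactly the closed-form Gray decode index
theorem grayScan_eq (a b : Int) (ha : a = 0 ∨ a = 1) (hb : b = 0 ∨ b = 1) :
    grayScan [a, b] (PySem.List.pyRange 0 4 1) = [2 * a + PySem.Int.mod (a + b) 2] := by
  rcases ha with rfl | rfl <;> rcases hb with rfl | rfl <;> decide

theorem pv_mod2 (m : Int) : PySem.Int.mod m 2 = m % 2 :=
  PySem.Int.mod_eq_emod_of_pos (by norm_num)

theorem pv_div2 (m : Int) : PySem.Int.floordiv m 2 = m / 2 :=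
  PySem.Int.floordiv_eq_ediv_of_pos (by norm_num)

theorem pv_div4 (m : Int) : PySem.Int.floordiv m 4 = m / 4 :=
  PySem.Int.floordiv_eq_ediv_of_pos (by norm_num)

-- ===== VERDICT (by name: the statement is the Claim_ definition above) =====
theorem KarnoCoordinates_spec : Claim_equal_KarnoCoordinates := by
  intro numb _
  unfold Spec_KarnoCoordinates KarnoCoordinates KarnoCoordinates_alt
  simp only [pv_mod2, pv_div2, pv_div4, List.foldl, List.nil_append]
  rw [grayScan_eq _ _ (by omega) (by omega), grayScan_eq _ _ (by omega) (by omega)]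
  simp only [pv_mod2, List.cons_append, List.nil_append, List.cons.injEq, and_true]
  omega
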